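-- pv_equiv track=rewrite | github.com/mindspore-ai/hyper-parallel | .agentic/skills/autogit/scripts/pr_content.py | _generate_default_points
-- ===== SOURCE A (Python) =====
-- from typing import Dict, List, Optional, Tuple
--
-- def _categorize_funcs(funcs: List[str]) -> Tuple[List[str], List[str], List[str]]:
--     """Categorize functions by type: (cmd_funcs, api_funcs, other_funcs).
--
--     Args:
--         funcs: List of function names.
--
--     Returns:
--         Tuple of (cmd_funcs, api_funcs, other_funcs).
--     """
--     cmd = [f for f in funcs if f.startswith('cmd_')]
--     api = [f for f in funcs if 'api' in f.lower() or 'request' in f.lower()]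
--     other = [f for f in funcs if f not in cmd and f not in api]
--     return cmd, api, other
--
-- def _generate_default_points(added_funcs: List[str],
--                              added_classes: List[str]) -> List[str]:
--     """Generate default feature points based on code structure.
--
--     Args:
--         added_funcs: List of added function names.
--         added_classes: List of added class names.
--
--     Returns:
--         List of feature point strings.
--     """
--     points = [f"新增 `{cls}` 类" for cls in added_classes[:3]]
--
--     if not added_funcs:
--         return points
--
--     cmd_funcs, api_funcs, other_funcs = _categorize_funcs(added_funcs)
--     if cmd_funcs:
--         names = '`, `'.join(cmd_funcs[:3])
--         points.append(f"支持 {len(cmd_funcs)} 个命令: `{names}`")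
--     if api_funcs:
--         points.append(f"新增 {len(api_funcs)} 个 API 接口")
--     if other_funcs and len(points) < 3:
--         points.append(f"新增 {len(other_funcs)} 个辅助函数")
--     return points
-- ===== SOURCE B (Python) =====
-- from typing import List
--
--
-- def _generate_default_points(added_funcs: List[str],
--                              added_classes: List[str]) -> List[str]:
--     points = [f"新增 `{cls}` 类" for cls in added_classes[:3]]
--
--     if not added_funcs:
--         return points
--
--     # One pass over the function names: keep only the first three cmd names
--     # and three counters; no intermediate category lists, no list re-scans.
--     cmd_first3: List[str] = []
--     n_cmd = n_api = n_other = 0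
--     for f in added_funcs:
--         is_cmd = f.startswith('cmd_')
--         low = f.lower()
--         is_api = 'api' in low or 'request' in low
--         if is_cmd:
--             n_cmd += 1
--             if len(cmd_first3) < 3:
--                 cmd_first3.append(f)
--         if is_api:
--             n_api += 1
--         if not is_cmd and not is_api:
--             n_other += 1
--
--     if n_cmd:
--         names = '`, `'.join(cmd_first3)
--         points.append(f"支持 {n_cmd} 个命令: `{names}`")
--     if n_api:
--         points.append(f"新增 {n_api} 个 API 接口")
--     if n_other and len(points) < 3:
--         points.append(f"新增 {n_other} 个辅助函数")
--     return points
-- ===== Notes on version B (the rewrite author's own statement) =====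
-- stated objective: alternative
-- what changed: Replaced the three-comprehension categorization (whose 'other' comprehension rescans the cmd and api lists for every name) by a single pass over added_funcs maintaining three counters and the first three cmd names; no category lists are materialized. Worst-case O(n^2) becomes O(n), but on typical inputs the measured cost is the same.
import Mathlib
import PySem

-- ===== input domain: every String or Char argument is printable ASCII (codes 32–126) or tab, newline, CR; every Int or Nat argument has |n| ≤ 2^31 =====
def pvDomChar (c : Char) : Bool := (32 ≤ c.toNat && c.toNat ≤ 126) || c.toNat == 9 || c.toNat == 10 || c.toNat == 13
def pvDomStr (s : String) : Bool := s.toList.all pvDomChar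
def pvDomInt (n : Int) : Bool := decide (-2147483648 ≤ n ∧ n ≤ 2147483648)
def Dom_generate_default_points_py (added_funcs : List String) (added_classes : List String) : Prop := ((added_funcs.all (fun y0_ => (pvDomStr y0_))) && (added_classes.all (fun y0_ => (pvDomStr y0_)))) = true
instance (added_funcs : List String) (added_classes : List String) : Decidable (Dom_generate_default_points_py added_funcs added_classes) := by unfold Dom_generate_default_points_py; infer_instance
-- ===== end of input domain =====

-- B replaces A's three comprehensions (whose `other` rescans the cmd/api lists per name)
-- by one pass keeping three counters and the first three cmd names; return values proved equal.

-- ===== PORT A =====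
-- f.startswith('cmd_')
def pvIsCmd (f : String) : Bool := PySem.Str.startswith f "cmd_"
-- 'api' in f.lower() or 'request' in f.lower()
def pvIsApi (f : String) : Bool :=
  PySem.Str.isIn "api" (PySem.Str.lower f) || PySem.Str.isIn "request" (PySem.Str.lower f)

-- _categorize_funcs: three list comprehensions, `other` tests membership in cmd and api
def pvCategorize (funcs : List String) : List String × List String × List String :=
  let cmd := funcs.filter (fun f => pvIsCmd f)
  let api := funcs.filter (fun f => pvIsApi f)
  let other := funcs.filter (fun f => !(cmd.contains f) && !(api.contains f))
  (cmd, api, other)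

def generate_default_points_py (added_funcs : List String) (added_classes : List String) : List String :=
  let points := (PySem.List.slice added_classes none (some 3)).map
                  (fun cls => "新增 `" ++ cls ++ "` 类")
  if added_funcs = [] then points
  else
    let c := pvCategorize added_funcs
    let cmd_funcs := c.1
    let api_funcs := c.2.1
    let other_funcs := c.2.2
    let points := if cmd_funcs ≠ [] then
        points ++ ["支持 " ++ PySem.Int.toStr (cmd_funcs.length : Int) ++ " 个命令: `"
                   ++ PySem.Str.join "`, `" (PySem.List.slice cmd_funcs none (some 3)) ++ "`"]
      else points
    let points := if api_funcs ≠ [] then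
        points ++ ["新增 " ++ PySem.Int.toStr (api_funcs.length : Int) ++ " 个 API 接口"]
      else points
    let points := if other_funcs ≠ [] ∧ points.length < 3 then
        points ++ ["新增 " ++ PySem.Int.toStr (other_funcs.length : Int) ++ " 个辅助函数"]
      else points
    points

-- ===== PORT B =====
-- the single pass of Source B: (cmd_first3, n_cmd, n_api, n_other)
def pvLoop (funcs : List String) (cmd3 : List String) (ncmd napi noth : Nat) :
    List String × Nat × Nat × Nat :=
  match funcs with
  | [] => (cmd3, ncmd, napi, noth)
  | f :: rest =>
    let isCmd := pvIsCmd f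
    let isApi := pvIsApi f
    pvLoop rest
      (if isCmd && decide (cmd3.length < 3) then cmd3 ++ [f] else cmd3)
      (if isCmd then ncmd + 1 else ncmd)
      (if isApi then napi + 1 else napi)
      (if !isCmd && !isApi then noth + 1 else noth)

def generate_default_points_py_alt (added_funcs : List String) (added_classes : List String) : List String :=
  let points := (PySem.List.slice added_classes none (some 3)).map
                  (fun cls => "新增 `" ++ cls ++ "` 类")
  if added_funcs = [] then points
  else
    let st := pvLoop added_funcs [] 0 0 0
    let cmd3 := st.1
    let ncmd := st.2.1
    let napi := st.2.2.1
    let noth := st.2.2.2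
    let points := if ncmd ≠ 0 then
        points ++ ["支持 " ++ PySem.Int.toStr (ncmd : Int) ++ " 个命令: `"
                   ++ PySem.Str.join "`, `" cmd3 ++ "`"]
      else points
    let points := if napi ≠ 0 then
        points ++ ["新增 " ++ PySem.Int.toStr (napi : Int) ++ " 个 API 接口"]
      else points
    let points := if noth ≠ 0 ∧ points.length < 3 then
        points ++ ["新增 " ++ PySem.Int.toStr (noth : Int) ++ " 个辅助函数"]
      else points
    points

-- ===== PRECONDITION & SPEC =====
def Spec_generate_default_points_py (added_funcs : List String) (added_classes : List String) (out : List String) : Prop := out = generate_default_points_py_alt added_funcs added_classes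
instance (added_funcs : List String) (added_classes : List String) (out : List String) : Decidable (Spec_generate_default_points_py added_funcs added_classes out) := by unfold Spec_generate_default_points_py; infer_instance

-- ===== CLAIM (what is proved, stated in full; the proofs are below) =====
def Claim_equal_generate_default_points_py : Prop := ∀ (added_funcs : List String) (added_classes : List String), Dom_generate_default_points_py added_funcs added_classes → Spec_generate_default_points_py added_funcs added_classes (generate_default_points_py added_funcs added_classes)

-- ===== LEMMAS AND PROOFS =====

-- membership in a filter of funcs is just the predicate, for elements of funcs
lemma contains_filter_eq (funcs : List String) (p : String → Bool) (f : String)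
    (hf : f ∈ funcs) : (funcs.filter p).contains f = p f := by
  by_cases h : p f = true
  · simp [List.mem_filter, hf, h]
  · simp only [Bool.not_eq_true] at h
    simp [List.mem_filter, h]

-- A's `other` list is the plain one-pass filter
lemma other_eq (funcs : List String) :
    funcs.filter (fun f => !((funcs.filter (fun g => pvIsCmd g)).contains f)
                        && !((funcs.filter (fun g => pvIsApi g)).contains f))
      = funcs.filter (fun f => !(pvIsCmd f) && !(pvIsApi f)) := by
  apply List.filter_congr
  intro f hf
  rw [contains_filter_eq funcs _ f hf, contains_filter_eq funcs _ f hf]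

-- the loop invariant of B's single pass
lemma pvLoop_spec (funcs : List String) :
    ∀ (c : List String) (a b o : Nat), c.length ≤ 3 →
    pvLoop funcs c a b o
      = (c ++ (funcs.filter (fun f => pvIsCmd f)).take (3 - c.length),
         a + (funcs.filter (fun f => pvIsCmd f)).length,
         b + (funcs.filter (fun f => pvIsApi f)).length,
         o + (funcs.filter (fun f => !(pvIsCmd f) && !(pvIsApi f))).length) := by
  induction funcs with
  | nil => intro c a b o hc; simp [pvLoop]
  | cons f rest ih =>
    intro c a b o hc
    by_cases hcmd : pvIsCmd f = true
    · by_cases hlt : c.length < 3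
      · have h3 : 3 - c.length = (3 - (c.length + 1)) + 1 := by omega
        simp only [pvLoop, hcmd, hlt, decide_true, Bool.true_and, if_true,
          Bool.not_true, Bool.false_and, Bool.false_eq_true, if_false]
        rw [ih _ _ _ _ (by simp; omega)]
        simp only [List.filter_cons, hcmd, if_true, List.length_append,
          List.length_singleton, h3, List.take_succ_cons, Prod.mk.injEq]
        refine ⟨by simp, by simp only [List.length_cons]; omega, ?_, ?_⟩ <;>
          · by_cases hapi : pvIsApi f = true <;> simp [hapi] <;> omega
      · simp only [pvLoop, hcmd, hlt, decide_false, Bool.and_false,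
          Bool.false_eq_true, if_false, if_true, Bool.not_true, Bool.false_and]
        rw [ih _ _ _ _ hc]
        have h0 : 3 - c.length = 0 := by omega
        simp only [List.filter_cons, hcmd, if_true, h0, List.take_zero,
          Prod.mk.injEq, List.length_cons]
        refine ⟨by simp, by omega, ?_, ?_⟩ <;>
          · by_cases hapi : pvIsApi f = true <;> simp [hapi] <;> omega
    · simp only [Bool.not_eq_true] at hcmd
      simp only [pvLoop, hcmd, Bool.false_and, Bool.false_eq_true, if_false,
        Bool.not_false, Bool.true_and]
      rw [ih _ _ _ _ hc]
      simp only [List.filter_cons, hcmd, Bool.false_eq_true, if_false,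
        Bool.not_false, Bool.true_and, Prod.mk.injEq]
      refine ⟨by trivial, by trivial, ?_, ?_⟩ <;>
        by_cases hapi : pvIsApi f = true <;> simp [hapi] <;> omega

-- ===== VERDICT (by name: the statement is the Claim_ definition above) =====
theorem generate_default_points_py_spec : Claim_equal_generate_default_points_py := by
  intro funcs classes _
  unfold Spec_generate_default_points_py generate_default_points_py generate_default_points_py_alt
  by_cases hne : funcs = []
  · simp [hne]
  · simp only [hne, if_false]
    rw [pvLoop_spec funcs [] 0 0 0 (by simp)]
    unfold pvCategorize
    have hslice : ∀ (xs : List String),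
        PySem.List.slice xs none (some 3) = xs.take 3 := by
      intro xs
      have := PySem.List.slice_to_natCast xs (b := 3)
      simpa using this
    simp only [hslice, List.nil_append, List.length_nil, Nat.sub_zero,
      Nat.zero_add, other_eq]
    simp [List.length_eq_zero_iff]
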